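-- pv_equiv track=rewrite | github.com/gitpher/ProblemSolving | Programmers/프로세스.py | solution
-- ===== SOURCE A (Python) =====
-- from collections import deque
--
-- def solution(priorities, location):
--
--     dq = deque()
--
--     for i in range(len(priorities)):
--         dq.append((priorities[i], i))
--
--     priorities.sort(reverse=True)
--
--     i = 0
--     while dq:
--         cur = dq.popleft()
--         if cur[0] == priorities[i]:
--             i += 1
--             if cur[1] == location:
--                 break
--         else:
--             dq.append(cur)
--
--     return i
-- ===== SOURCE B (Python) =====
-- def solution(priorities, location):
--     queue = [(p, i) for i, p in enumerate(priorities)]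
--     printed = 0
--     while queue:
--         m = max(p for p, _ in queue)
--         j = next(k for k, e in enumerate(queue) if e[0] == m)
--         printed += 1
--         if queue[j][1] == location:
--             return printed
--         queue = queue[j + 1:] + queue[:j]
--     return printed
-- ===== Notes on version B (the rewrite author's own statement) =====
-- stated objective: alternative
-- what changed: B drops A's descending pre-sort and element-by-element deque rotation: each round it finds the first maximum-priority document by argmax and splices the queue directly to the next print (queue[j+1:]+queue[:j]), counting prints until the target; note A also sorts its `priorities` argument in place, which B does not (the claim is about the return value).
import Mathlib
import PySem

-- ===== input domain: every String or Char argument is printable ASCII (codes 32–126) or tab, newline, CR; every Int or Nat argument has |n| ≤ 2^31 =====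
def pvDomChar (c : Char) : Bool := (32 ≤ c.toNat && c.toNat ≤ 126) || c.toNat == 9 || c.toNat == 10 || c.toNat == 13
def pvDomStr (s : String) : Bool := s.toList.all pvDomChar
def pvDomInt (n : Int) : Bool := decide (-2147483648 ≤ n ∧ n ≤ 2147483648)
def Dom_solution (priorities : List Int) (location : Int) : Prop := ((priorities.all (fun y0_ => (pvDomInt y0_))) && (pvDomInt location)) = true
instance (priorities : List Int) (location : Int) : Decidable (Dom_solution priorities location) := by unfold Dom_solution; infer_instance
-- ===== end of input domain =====

-- B replaces A's pre-sort plus one-element-at-a-time deque rotation by an argmax-and-splice round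
-- per printed document (alternative structure, same worst-case cost). A sorts its `priorities`
-- argument in place, B does not: the equivalence proved here is about the return value only.

-- ===== PORT A =====
-- A's while loop, one fuel unit per iteration (popleft; compare with sorted priorities[i];
-- print-or-requeue). Fuel n*n+n is an upper bound on the iteration count (proved below),
-- so the fuel-0 branch is never reached on the inputs of the claim.
def solutionLoopA (sp : List Int) (location : Int) : Nat → List (Int × Int) → Int → Int
  | 0, _, i => i
  | f + 1, dq, i =>
    match dq with
    | [] => i
    | cur :: rest =>
      if cur.1 = PySem.List.pyGetD sp i 0 then
        (if cur.2 = location then i + 1 else solutionLoopA sp location f rest (i + 1))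
      else solutionLoopA sp location f (rest ++ [cur]) i

def solution (priorities : List Int) (location : Int) : Int :=
  -- for i in range(len(priorities)): dq.append((priorities[i], i))
  let dq := (PySem.List.pyRange 0 priorities.length 1).map
      (fun j => (PySem.List.pyGetD priorities j 0, j))
  -- priorities.sort(reverse=True)
  let sp := PySem.List.sorted priorities (fun x => x) true
  solutionLoopA sp location (priorities.length * priorities.length + priorities.length) dq 0

-- ===== PORT B =====
-- B's while loop: fuel is exactly the queue length (each round removes one element).
def solutionLoopB (location : Int) : Nat → List (Int × Int) → Int → Int
  | 0, _, printed => printed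
  | f + 1, q, printed =>
    match q with
    | [] => printed
    | _ :: _ =>
      let m := (PySem.List.max? (q.map Prod.fst) (fun x => x)).getD 0
      let j := q.findIdx (fun e => decide (e.1 = m))
      if (PySem.List.pyGetD q (j : Int) (0, 0)).2 = location then printed + 1
      else solutionLoopB location f
        (PySem.List.slice q (some ((j : Int) + 1)) none ++ PySem.List.slice q none (some (j : Int)))
        (printed + 1)

def solution_alt (priorities : List Int) (location : Int) : Int :=
  let queue := (PySem.List.enumerate priorities 0).map (fun e => (e.2, e.1))
  solutionLoopB location queue.length queue 0

-- ===== PRECONDITION & SPEC =====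
def Spec_solution (priorities : List Int) (location : Int) (out : Int) : Prop := out = solution_alt priorities location
instance (priorities : List Int) (location : Int) (out : Int) : Decidable (Spec_solution priorities location out) := by unfold Spec_solution; infer_instance

-- ===== CLAIM (what is proved, stated in full; the proofs are below) =====
def Claim_equal_solution : Prop := ∀ (priorities : List Int) (location : Int), Dom_solution priorities location → Spec_solution priorities location (solution priorities location)

-- ===== LEMMAS AND PROOFS =====

-- Rotating j mismatching elements of A's deque to the back, one fuel unit each.
theorem rotA (sp : List Int) (location : Int) :
    ∀ (j : Nat) (q : List (Int × Int)) (f : Nat) (i : Int), j ≤ q.length →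
      (∀ e ∈ q.take j, ¬ e.1 = PySem.List.pyGetD sp i 0) →
      solutionLoopA sp location (j + f) q i = solutionLoopA sp location f (q.drop j ++ q.take j) i := by
  intro j
  induction j with
  | zero => intro q f i _ _; simp
  | succ j ih =>
    intro q f i hle htake
    match q with
    | [] => simp at hle
    | c :: rest =>
      have hc : ¬ c.1 = PySem.List.pyGetD sp i 0 := htake c (by simp)
      have hstep : solutionLoopA sp location (j + 1 + f) (c :: rest) i
          = solutionLoopA sp location (j + f) (rest ++ [c]) i := by
        have : j + 1 + f = (j + f) + 1 := by omega
        rw [this]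
        simp only [solutionLoopA, if_neg hc]
      rw [hstep]
      have hle' : j ≤ (rest ++ [c]).length := by simp at hle ⊢; omega
      have hjr : j ≤ rest.length := by simp at hle; omega
      have htk : (rest ++ [c]).take j = rest.take j := List.take_append_of_le_length hjr
      have hdr : (rest ++ [c]).drop j = rest.drop j ++ [c] := List.drop_append_of_le_length hjr
      rw [ih (rest ++ [c]) f i hle' (by
        intro e he
        rw [htk] at he
        exact htake e (by simp [List.mem_take_iff_getElem] at he ⊢; tauto))]
      rw [htk, hdr]
      simp [List.append_assoc]

-- One A-round (rotate to the first max, pop it) agrees with one B-round, then induct.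
theorem loop_eq (location : Int) (sp : List Int) (hsp : sp.Pairwise (fun a b => b ≤ a)) :
    ∀ (n : Nat) (q : List (Int × Int)) (k : Nat) (f : Nat), q.length = n →
      (q.map Prod.fst).Perm (sp.drop k) →
      q.length * q.length + q.length ≤ f →
      solutionLoopA sp location f q (k : Int) = solutionLoopB location q.length q (k : Int) := by
  intro n
  induction n using Nat.strong_induction_on with
  | _ n ih =>
    intro q k f hlen hperm hfuel
    match q, hlen with
    | [], _ =>
      cases f <;> simp [solutionLoopA, solutionLoopB]
    | c :: rest, hlen =>
      have hlenq : (c :: rest).length = rest.length + 1 := by simp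
      -- k is in range of sp
      have hlens : (sp.drop k).length = rest.length + 1 := by
        rw [← hperm.length_eq]; simp
      have hklt : k < sp.length := by
        have : (sp.drop k).length = sp.length - k := by simp
        omega
      set m := sp[k] with hm
      have hdropk : sp.drop k = m :: sp.drop (k + 1) := List.drop_eq_getElem_cons hklt
      -- m is the maximum of the queue priorities
      have hmmem : m ∈ (c :: rest).map Prod.fst := by
        rw [hperm.mem_iff, hdropk]; exact List.mem_cons_self
      have hmax : ∀ x ∈ (c :: rest).map Prod.fst, x ≤ m := by
        intro x hx
        rw [hperm.mem_iff, hdropk] at hx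
        have hp : (m :: sp.drop (k + 1)).Pairwise (fun a b => b ≤ a) :=
          hdropk ▸ hsp.sublist (List.drop_sublist k sp)
        rcases List.mem_cons.1 hx with hx | hx
        · exact le_of_eq hx
        · exact List.rel_of_pairwise_cons hp hx
      -- A reads m from the sorted list
      have hgetD : PySem.List.pyGetD sp (k : Int) 0 = m := by
        rw [PySem.List.pyGetD_natCast, List.getD_eq_getElem?_getD, List.getElem?_eq_getElem hklt]
        rfl
      -- B computes the same m via max?
      have hmaxeq : (PySem.List.max? ((c :: rest).map Prod.fst) (fun x => x)).getD 0 = m := by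
        obtain ⟨m', hm'⟩ : ∃ m', PySem.List.max? ((c :: rest).map Prod.fst) (fun x => x) = some m' := by
          cases h : PySem.List.max? ((c :: rest).map Prod.fst) (fun x => x) with
          | none => simp [PySem.List.max?_eq_none_iff] at h
          | some v => exact ⟨v, rfl⟩
        have h1 : m' ≤ m := hmax m' (PySem.List.max?_mem hm')
        have h2 : m ≤ m' := PySem.List.max?_isMax hm' m hmmem
        simp only [hm', Option.getD_some]; exact (le_antisymm h1 h2).symm ▸ rfl
      -- the argmax index j
      set j := (c :: rest).findIdx (fun e => decide (e.1 = m)) with hjdef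
      have hj : j < (c :: rest).length := by
        apply List.findIdx_lt_length.2
        obtain ⟨e, he, hefst⟩ := List.mem_map.1 hmmem
        exact ⟨e, he, by simp [hefst]⟩
      have hpj : ((c :: rest)[j]).1 = m := by
        have := @List.findIdx_getElem _ (fun e => decide (e.1 = m)) (c :: rest) hj
        simpa using this
      have hbefore : ∀ e ∈ (c :: rest).take j, ¬ e.1 = PySem.List.pyGetD sp (k : Int) 0 := by
        intro e he
        rw [hgetD]
        rw [List.mem_take_iff_getElem] at he
        obtain ⟨i, hi, hei⟩ := he
        have hnot : ¬ ((c :: rest)[i].1 = m) := by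
          simpa using List.not_of_lt_findIdx (xs := c :: rest)
            (p := fun e => decide (e.1 = m)) (lt_min_iff.1 hi).1
        rw [← hei]
        exact hnot
      -- rotate A's deque to the argmax
      have hjf : j + (f - j) = f := by omega
      have hArot := rotA sp location j (c :: rest) (f - j) (k : Int) (le_of_lt hj) hbefore
      rw [hjf] at hArot
      have hdropj : (c :: rest).drop j = (c :: rest)[j] :: (c :: rest).drop (j + 1) :=
        List.drop_eq_getElem_cons hj
      have hfj : f - j = (f - j - 1) + 1 := by
        have := hlenq ▸ hfuel; omega
      -- one printing step of A
      have hAstep : solutionLoopA sp location (f - j) ((c :: rest).drop j ++ (c :: rest).take j) (k : Int)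
          = if ((c :: rest)[j]).2 = location then (k : Int) + 1
            else solutionLoopA sp location (f - j - 1)
              ((c :: rest).drop (j + 1) ++ (c :: rest).take j) ((k : Int) + 1) := by
        rw [hfj, hdropj]
        simp only [List.cons_append, solutionLoopA, hpj, hgetD, if_pos, Nat.add_sub_cancel]
      -- one step of B
      have hq_at_j : PySem.List.pyGetD (c :: rest) (j : Int) ((0:Int), (0:Int)) = (c :: rest)[j] := by
        rw [PySem.List.pyGetD_natCast, List.getD_eq_getElem?_getD, List.getElem?_eq_getElem hj]
        rfl
      have hslice1 : PySem.List.slice (c :: rest) (some ((j : Int) + 1)) none = (c :: rest).drop (j + 1) := by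
        have : ((j : Int) + 1) = ((j + 1 : Nat) : Int) := by push_cast; ring
        rw [this, PySem.List.slice_from_natCast]
      have hslice2 : PySem.List.slice (c :: rest) none (some (j : Int)) = (c :: rest).take j :=
        PySem.List.slice_to_natCast ..
      have hBstep : solutionLoopB location (c :: rest).length (c :: rest) (k : Int)
          = if ((c :: rest)[j]).2 = location then (k : Int) + 1
            else solutionLoopB location rest.length
              ((c :: rest).drop (j + 1) ++ (c :: rest).take j) ((k : Int) + 1) := by
        rw [hlenq]
        simp only [solutionLoopB, hmaxeq, ← hjdef, hq_at_j, hslice1, hslice2]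
      rw [hArot, hAstep, hBstep]
      by_cases hloc : ((c :: rest)[j]).2 = location
      · simp [hloc]
      · simp only [if_neg hloc]
        -- the new queue
        set q' := (c :: rest).drop (j + 1) ++ (c :: rest).take j with hq'
        have hlen' : q'.length = rest.length := by
          have := hlenq ▸ hj
          simp [hq']; omega
        -- permutation invariant for the next round
        have hq_decomp : (c :: rest) = (c :: rest).take j ++ (c :: rest)[j] :: (c :: rest).drop (j + 1) := by
          conv_lhs => rw [← List.take_append_drop j (c :: rest)]
          rw [hdropj]
        have hperm' : (q'.map Prod.fst).Perm (sp.drop (k + 1)) := by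
          have h1 : ((c :: rest).map Prod.fst).Perm
              (m :: (((c :: rest).take j).map Prod.fst ++ ((c :: rest).drop (j + 1)).map Prod.fst)) := by
            conv_lhs => rw [hq_decomp]
            simp only [List.map_append, List.map_cons, hpj]
            exact List.perm_middle
          have h2 : (m :: (((c :: rest).take j).map Prod.fst ++ ((c :: rest).drop (j + 1)).map Prod.fst)).Perm
              (m :: sp.drop (k + 1)) := (h1.symm.trans hperm).trans (by rw [hdropk])
          have h3 := h2.cons_inv
          have h4 : (q'.map Prod.fst)
              = ((c :: rest).drop (j + 1)).map Prod.fst ++ ((c :: rest).take j).map Prod.fst := by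
            simp [hq']
          rw [h4]
          exact List.perm_append_comm.trans h3
        -- fuel for the next round
        have hfuel' : q'.length * q'.length + q'.length ≤ f - j - 1 := by
          rw [hlen']
          have hexp : (rest.length + 1) * (rest.length + 1) + (rest.length + 1)
              = rest.length * rest.length + 3 * rest.length + 2 := by ring
          have hf2 := hlenq ▸ hfuel
          rw [hexp] at hf2
          have hjle : j ≤ rest.length := by have := hlenq ▸ hj; omega
          generalize rest.length * rest.length = RR at *
          omega
        have hcast : ((k : Int) + 1) = ((k + 1 : Nat) : Int) := by push_cast; ring
        rw [hcast, ← hlen']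
        exact ih rest.length (by omega) q' (k + 1) (f - j - 1) hlen' hperm' hfuel'

-- ===== VERDICT (by name: the statement is the Claim_ definition above) =====
theorem solution_spec : Claim_equal_solution := by
  intro priorities location _
  unfold Spec_solution solution solution_alt
  have hsp : (PySem.List.sorted priorities (fun x => x) true).Pairwise (fun a b => b ≤ a) :=
    PySem.List.sorted_pairwise_rev (xs := priorities) (key := fun x => x)
  -- the two initial queues are the same list
  have hq : ((PySem.List.pyRange 0 priorities.length 1).map (fun j => (PySem.List.pyGetD priorities j 0, j)))
      = (PySem.List.enumerate priorities 0).map (fun e => (e.2, e.1)) := by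
    rw [PySem.List.enumerate_eq_map_pyRange (d := 0)]
    simp [List.map_map, Function.comp]
  have hfst : (((PySem.List.pyRange 0 priorities.length 1).map
      (fun j => (PySem.List.pyGetD priorities j 0, j))).map Prod.fst) = priorities := by
    rw [List.map_map]
    simpa [Function.comp] using PySem.List.map_pyGetD_pyRange_zero' priorities 0
  have hlen : ((PySem.List.pyRange 0 priorities.length 1).map
      (fun j => (PySem.List.pyGetD priorities j 0, j))).length = priorities.length := by
    simp [PySem.List.length_pyRange_one]
  have hperm : (((PySem.List.pyRange 0 priorities.length 1).map
      (fun j => (PySem.List.pyGetD priorities j 0, j))).map Prod.fst).Perm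
      ((PySem.List.sorted priorities (fun x => x) true).drop 0) := by
    rw [hfst, List.drop_zero]
    exact (PySem.List.sorted_perm ..).symm
  have h := loop_eq location (PySem.List.sorted priorities (fun x => x) true) hsp
    (((PySem.List.pyRange 0 priorities.length 1).map
      (fun j => (PySem.List.pyGetD priorities j 0, j))).length)
    ((PySem.List.pyRange 0 priorities.length 1).map
      (fun j => (PySem.List.pyGetD priorities j 0, j)))
    0 (priorities.length * priorities.length + priorities.length) rfl hperm (by rw [hlen])
  simp only [Nat.cast_zero] at h
  rw [← hq] at *
  simpa only [hlen] using h
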